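-- pv_equiv track=rewrite | github.com/sobriquette/interview-practice-problems | Code Challenges/hackbright.py | get_distances_of_matching_characters
-- ===== SOURCE A (Python) =====
-- def get_distances_of_matching_characters(string, characters_with_matches):
-- 	max_distance_indices = [-1, -1]
-- 	distances_dict = {}
-- 	for index, char in enumerate(string):
-- 		# Look at character only if it has a match
-- 		if characters_with_matches[char] > 0:
-- 			# Update the dictionary with the index of the 2nd matching character
-- 			if char in distances_dict:
-- 				distances_dict[char][1] = index
-- 				# Update max_distance_indices if the distance b/n the current set of indices
-- 				# is greater than what we found in max_distance_indices
-- 				char_dist = distances_dict[char][1] - distances_dict[char][0]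
-- 				curr_max_dist = max_distance_indices[1] - max_distance_indices[0]
-- 				if char_dist > curr_max_dist:
-- 					max_distance_indices = [distances_dict[char][0], distances_dict[char][1]]
-- 			# Otherwise, we update distances_dict with
-- 			# the index of the first matching character
-- 			else:
-- 				distances_dict[char] = [index, None]
--
-- 	return max_distance_indices
-- ===== SOURCE B (Python) =====
-- def get_distances_of_matching_characters(string, characters_with_matches):
-- 	# Dict-free brute force over first occurrences: a position is a candidate iff it is
-- 	# the first occurrence of its (matched) character; its partner is the last occurrence.
-- 	best = [-1, -1]
-- 	for i, char in enumerate(string):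
-- 		if characters_with_matches[char] > 0 and string.index(char) == i:
-- 			last = string.rindex(char)
-- 			if last - i > best[1] - best[0]:
-- 				best = [i, last]
-- 	return best
-- ===== Notes on version B (the rewrite author's own statement) =====
-- stated objective: simpler
-- what changed: A's single fused pass maintaining a dict of first/last indices and a running maximum is replaced by a dict-free brute force: a position is a candidate iff string.index(char) says it is the first occurrence of its matched character, its partner is string.rindex(char), and the strictly-greater test keeps A's tie-break.
import Mathlib
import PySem

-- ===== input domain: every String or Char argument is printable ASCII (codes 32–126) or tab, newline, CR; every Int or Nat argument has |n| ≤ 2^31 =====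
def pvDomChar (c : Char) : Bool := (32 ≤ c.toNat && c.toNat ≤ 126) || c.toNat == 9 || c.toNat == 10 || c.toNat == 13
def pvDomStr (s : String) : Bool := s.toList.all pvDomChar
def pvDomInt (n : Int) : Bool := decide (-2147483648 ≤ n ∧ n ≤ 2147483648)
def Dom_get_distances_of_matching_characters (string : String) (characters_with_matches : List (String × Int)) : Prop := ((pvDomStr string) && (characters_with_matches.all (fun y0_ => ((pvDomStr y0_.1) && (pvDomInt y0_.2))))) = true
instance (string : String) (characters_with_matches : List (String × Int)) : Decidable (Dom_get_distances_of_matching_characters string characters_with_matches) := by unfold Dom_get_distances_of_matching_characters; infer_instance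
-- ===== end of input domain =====

-- B drops A's dict-with-running-maximum entirely: a position is a candidate iff it is the first
-- occurrence of its (matched) character, its partner is that character's last occurrence (found by
-- separate scans); objective: simpler (dict-free brute force; O(n^2) vs A's O(n)).

-- ===== PORT A =====
def pvStepA (cwm : List (String × Int)) (st : (Int × Int) × PySem.Dict String (Int × Option Int))
    (p : Int × Char) : (Int × Int) × PySem.Dict String (Int × Option Int) :=
  let key := String.ofList [p.2]
  if (PySem.Dict.mk cwm).getD key 0 > 0 then
    match st.2.get? key with
    | some fv =>
      -- distances_dict[char][1] = index  (overwrite in place)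
      let dd := st.2.insert key (fv.1, some p.1)
      -- char_dist = dd[char][1] - dd[char][0];  curr = maxp[1] - maxp[0]
      if p.1 - fv.1 > st.1.2 - st.1.1 then ((fv.1, p.1), dd) else (st.1, dd)
    | none => (st.1, st.2.insert key (p.1, none))
  else st

def get_distances_of_matching_characters (string : String) (characters_with_matches : List (String × Int)) : List Int :=
  let st := (PySem.List.enumerate string.toList 0).foldl (pvStepA characters_with_matches) ((-1, -1), PySem.Dict.empty)
  [st.1.1, st.1.2]

-- ===== PORT B =====
-- candidate test: characters_with_matches[char] > 0 and string.index(char) == i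
def pvCondB (cwm : List (String × Int)) (cs : List Char) (p : Int × Char) : Bool :=
  decide ((PySem.Dict.mk cwm).getD (String.ofList [p.2]) 0 > 0) &&
    ((PySem.List.index? cs p.2).map (fun k => (k : Int)) == some p.1)

-- hand port of string.rindex(char) for a single character: last index = len - 1 - (index in the
-- reversed string); exact whenever the character occurs in the string (Python raises ValueError
-- otherwise — unreachable in B, whose char is always drawn from string)
def pvRIndex (cs : List Char) (c : Char) : Int :=
  (cs.length : Int) - 1 - (((PySem.List.index? cs.reverse c).getD 0 : Nat) : Int)

def get_distances_of_matching_characters_alt (string : String) (characters_with_matches : List (String × Int)) : List Int :=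
  let cs := string.toList
  let best := (PySem.List.enumerate cs 0).foldl (fun best p =>
    if pvCondB characters_with_matches cs p then
      let last := pvRIndex cs p.2
      if last - p.1 > best.2 - best.1 then (p.1, last) else best
    else best) (-1, -1)
  [best.1, best.2]

-- ===== PRECONDITION & SPEC =====
-- Pre_ excludes exactly the inputs on which Python A raises KeyError: some character of the
-- string is not a key of the dict (A looks every character up; B raises there too).
def Pre_get_distances_of_matching_characters (string : String) (characters_with_matches : List (String × Int)) : Prop :=
  (string.toList.all (fun c => characters_with_matches.any (fun e => e.1 == String.ofList [c]))) = true
instance (string : String) (characters_with_matches : List (String × Int)) : Decidable (Pre_get_distances_of_matching_characters string characters_with_matches) := by unfold Pre_get_distances_of_matching_characters; infer_instance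

def pvWitness_get_distances_of_matching_characters : String × (List (String × Int)) :=
  ("abcab", [("a", 1), ("b", 2), ("c", 0)])

def Spec_get_distances_of_matching_characters (string : String) (characters_with_matches : List (String × Int)) (out : List Int) : Prop := out = get_distances_of_matching_characters_alt string characters_with_matches
instance (string : String) (characters_with_matches : List (String × Int)) (out : List Int) : Decidable (Spec_get_distances_of_matching_characters string characters_with_matches out) := by unfold Spec_get_distances_of_matching_characters; infer_instance

-- ===== CLAIM (what is proved, stated in full; the proofs are below) =====
def Claim_equal_get_distances_of_matching_characters : Prop := ∀ (string : String) (characters_with_matches : List (String × Int)), Dom_get_distances_of_matching_characters string characters_with_matches → Pre_get_distances_of_matching_characters string characters_with_matches → Spec_get_distances_of_matching_characters string characters_with_matches (get_distances_of_matching_characters string characters_with_matches)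

-- ===== LEMMAS AND PROOFS =====

-- ghost dict (proof-side only): first/last index per matched character, in first-occurrence order
def pvStepB (cwm : List (String × Int)) (occ : PySem.Dict String (Int × Int))
    (p : Int × Char) : PySem.Dict String (Int × Int) :=
  let key := String.ofList [p.2]
  if (PySem.Dict.mk cwm).getD key 0 > 0 then
    match occ.get? key with
    | some fl => occ.insert key (fl.1, p.1)
    | none => occ.insert key (p.1, p.1)
  else occ

def pvOcc (cwm : List (String × Int)) (cs : List Char) : PySem.Dict String (Int × Int) :=
  (PySem.List.enumerate cs 0).foldl (pvStepB cwm) PySem.Dict.empty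

-- distance of a [first, last] pair, and the best-so-far step
def pvD (m : Int × Int) : Int := m.2 - m.1
def pvG (b v : Int × Int) : Int × Int := if v.2 - v.1 > b.2 - b.1 then v else b

-- leftmost entry with the strictly greatest distance
def pvLM : List (Int × Int) → Option (Int × Int)
  | [] => none
  | v :: t =>
    match pvLM t with
    | none => some v
    | some m => if pvD m > pvD v then some m else some v

lemma pvFoldl_char (xs : List (Int × Int)) : ∀ b : Int × Int,
    xs.foldl pvG b = (match pvLM xs with | none => b | some m => if pvD m > pvD b then m else b) := by
  induction xs with
  | nil => intro b; rfl
  | cons v t ih =>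
    intro b
    rw [List.foldl_cons, ih (pvG b v)]
    cases ht : pvLM t with
    | none =>
      simp only [pvLM, ht]
      rfl
    | some m =>
      simp only [pvLM, ht]
      by_cases h1 : pvD m > pvD v
      · rw [if_pos h1]
        simp only [pvG, pvD] at h1 ⊢
        split_ifs <;> first | rfl | omega
      · rw [if_neg h1]
        simp only [pvG, pvD] at h1 ⊢
        split_ifs <;> first | rfl | omega

lemma pvLM_mem {xs : List (Int × Int)} {m : Int × Int} (h : pvLM xs = some m) : m ∈ xs := by
  induction xs generalizing m with
  | nil => simp [pvLM] at h
  | cons v t ih =>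
    rw [pvLM] at h
    cases ht : pvLM t with
    | none => rw [ht] at h; injection h with h; subst h; exact List.mem_cons_self ..
    | some m' =>
      rw [ht] at h
      have h' : (if pvD m' > pvD v then some m' else some v) = some m := h
      split_ifs at h' <;> injection h' with h' <;> subst h'
      · exact List.mem_cons_of_mem _ (ih ht)
      · exact List.mem_cons_self ..

lemma pvLM_append (xs ys : List (Int × Int)) : pvLM (xs ++ ys) =
    (match pvLM xs, pvLM ys with
     | none, r => r
     | some a, none => some a
     | some a, some b => if pvD b > pvD a then some b else some a) := by
  induction xs with
  | nil => cases hy : pvLM ys <;> simp [pvLM, hy]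
  | cons v t ih =>
    rw [List.cons_append, pvLM, ih, pvLM]
    cases ht : pvLM t with
    | none =>
      cases hy : pvLM ys with
      | none => rfl
      | some b => rfl
    | some a =>
      cases hy : pvLM ys with
      | none =>
        by_cases h1 : pvD a > pvD v <;> simp [h1]
      | some b =>
        by_cases h1 : pvD b > pvD a <;> by_cases h2 : pvD a > pvD v <;>
          simp only [h1, h2, if_true, if_false] <;>
          split_ifs <;> simp only [pvD] at * <;> first | rfl | omega

lemma pvD_le_foldl (xs : List (Int × Int)) : ∀ b : Int × Int, pvD b ≤ pvD (xs.foldl pvG b) := by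
  induction xs with
  | nil => intro b; simp
  | cons v t ih =>
    intro b
    rw [List.foldl_cons]
    refine le_trans ?_ (ih (pvG b v))
    simp only [pvG, pvD]
    split_ifs with h
    · omega
    · exact le_refl _

lemma pvG_no (b v : Int × Int) (h : pvD v ≤ pvD b) : pvG b v = b := by
  simp only [pvG]
  rw [if_neg]
  simp only [pvD] at h
  omega

-- core of the update argument, with the two inner suffix-maxima already computed
lemma pvF_main (p x y : List (Int × Int)) (W : Int × Int) (f i : Int)
    (hx : pvLM x = some W) (hy : pvLM y = some (f, i))
    (hW : pvD W < i - f) (hpos : 0 < i - f) :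
    (p ++ y).foldl pvG (-1, -1) =
      (if i - f > pvD ((p ++ x).foldl pvG (-1, -1)) then (f, i)
       else (p ++ x).foldl pvG (-1, -1)) := by
  cases hp : pvLM p with
  | none =>
    have G1 : pvLM (p ++ x) = some W := by rw [pvLM_append, hp, hx]
    have G2 : pvLM (p ++ y) = some (f, i) := by rw [pvLM_append, hp, hy]
    simp only [pvFoldl_char, G1, G2, pvD] at hW ⊢
    split_ifs <;> first | rfl | omega
  | some mp =>
    have G1 : pvLM (p ++ x) = if pvD W > pvD mp then some W else some mp := by
      rw [pvLM_append, hp, hx]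
    have G2 : pvLM (p ++ y) = if pvD (f, i) > pvD mp then some (f, i) else some mp := by
      rw [pvLM_append, hp, hy]
    by_cases c2 : pvD (f, i) > pvD mp
    · rw [if_pos c2] at G2
      by_cases c1 : pvD W > pvD mp
      · rw [if_pos c1] at G1
        simp only [pvFoldl_char, G1, G2, pvD] at hW c1 c2 ⊢
        split_ifs <;> first | rfl | omega
      · rw [if_neg c1] at G1
        simp only [pvFoldl_char, G1, G2, pvD] at hW c1 c2 ⊢
        split_ifs <;> first | rfl | omega
    · rw [if_neg c2] at G2
      by_cases c1 : pvD W > pvD mp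
      · rw [if_pos c1] at G1
        simp only [pvFoldl_char, G1, G2, pvD] at hW c1 c2 ⊢
        split_ifs <;> first | rfl | omega
      · rw [if_neg c1] at G1
        simp only [pvFoldl_char, G1, G2, pvD] at hW c1 c2 ⊢
        split_ifs <;> first | rfl | omega

-- updating the last index of one recorded pair changes the best-pair fold exactly the way
-- A's fused loop updates its running maximum
lemma pvF_update (p q : List (Int × Int)) (f l i : Int)
    (hq : ∀ e ∈ q, f < e.1 ∧ e.1 ≤ e.2 ∧ e.2 < i) (hfl : f ≤ l) (hli : l < i) :
    (p ++ (f, i) :: q).foldl pvG (-1, -1) =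
      (if i - f > pvD ((p ++ (f, l) :: q).foldl pvG (-1, -1)) then (f, i)
       else (p ++ (f, l) :: q).foldl pvG (-1, -1)) := by
  have hpos : (0 : Int) < i - f := by omega
  cases hqq : pvLM q with
  | none =>
    have e1 : pvLM ((f, l) :: q) = some (f, l) := by simp [pvLM, hqq]
    have e2 : pvLM ((f, i) :: q) = some (f, i) := by simp [pvLM, hqq]
    exact pvF_main p _ _ (f, l) f i e1 e2 (by simp only [pvD]; omega) hpos
  | some mq =>
    have hmqb := hq _ (pvLM_mem hqq)
    have hd : pvD mq < i - f := by simp only [pvD]; omega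
    have e2 : pvLM ((f, i) :: q) = some (f, i) := by
      simp only [pvLM, hqq]
      rw [if_neg (by simp only [pvD]; omega)]
    by_cases c0 : pvD mq > pvD (f, l)
    · have e1 : pvLM ((f, l) :: q) = some mq := by
        simp only [pvLM, hqq]
        rw [if_pos c0]
      exact pvF_main p _ _ mq f i e1 e2 hd hpos
    · have e1 : pvLM ((f, l) :: q) = some (f, l) := by
        simp only [pvLM, hqq]
        rw [if_neg c0]
      exact pvF_main p _ _ (f, l) f i e1 e2 (by simp only [pvD]; omega) hpos

-- first-match association-list view of PySem.Dict.get?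
def pvAssoc {ν : Type} : List (String × ν) → String → Option ν
  | [], _ => none
  | e :: t, k => if e.1 == k then some e.2 else pvAssoc t k

-- the conversion from A's stored [first, maybe-last] to the ghost dict's stored [first, last]
def pvConv (v : Int × Option Int) : Int × Int := (v.1, v.2.getD v.1)

lemma pvGet_eq_assoc {ν : Type} (d : PySem.Dict String ν) (k : String) :
    d.get? k = pvAssoc d.items k := by
  obtain ⟨l⟩ := d
  induction l with
  | nil => rfl
  | cons e t ih =>
    obtain ⟨k', v⟩ := e
    rw [PySem.Dict.get?_mk_cons]
    show _ = pvAssoc ((k', v) :: t) k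
    rw [pvAssoc, ← ih]

lemma pvAssoc_map {ν μ : Type} (g : ν → μ) (l : List (String × ν)) (k : String) :
    pvAssoc (l.map (fun e => (e.1, g e.2))) k = (pvAssoc l k).map g := by
  induction l with
  | nil => rfl
  | cons e t ih =>
    rw [List.map_cons, pvAssoc, pvAssoc]
    have hc : (((e.1, g e.2) : String × μ).1 == k) = (e.1 == k) := rfl
    rw [hc]
    split_ifs with hk
    · rfl
    · exact ih

lemma pvAssoc_split {ν : Type} {l : List (String × ν)} {k : String} {v : ν}
    (h : pvAssoc l k = some v) : ∃ p q, l = p ++ (k, v) :: q ∧ ∀ e ∈ p, e.1 ≠ k := by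
  induction l with
  | nil => simp [pvAssoc] at h
  | cons e t ih =>
    rw [pvAssoc] at h
    by_cases hk : e.1 == k
    · rw [if_pos hk] at h
      injection h with h
      refine ⟨[], t, ?_, by simp⟩
      rw [List.nil_append]
      have hkk : e.1 = k := by simpa using hk
      have he : e = (e.1, e.2) := rfl
      rw [he, hkk, h]
    · rw [if_neg hk] at h
      obtain ⟨p, q, rfl, hp⟩ := ih h
      refine ⟨e :: p, q, rfl, ?_⟩
      intro x hx
      rcases List.mem_cons.1 hx with rfl | hx
      · simpa using hk
      · exact hp x hx

lemma pvAssoc_none {ν : Type} {l : List (String × ν)} {k : String}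
    (h : pvAssoc l k = none) : ∀ e ∈ l, e.1 ≠ k := by
  induction l with
  | nil => intro e he; simp at he
  | cons e t ih =>
    rw [pvAssoc] at h
    by_cases hk : e.1 == k
    · rw [if_pos hk] at h; cases h
    · rw [if_neg hk] at h
      intro x hx
      rcases List.mem_cons.1 hx with rfl | hx
      · simpa using hk
      · exact ih h x hx

-- the loop invariant tying A's fused state to the ghost dict
def pvInv (i : Int) (maxp : Int × Int) (dd : PySem.Dict String (Int × Option Int))
    (occ : PySem.Dict String (Int × Int)) : Prop :=
  occ.items = dd.items.map (fun e => (e.1, pvConv e.2))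
  ∧ (occ.items.map (·.1)).Nodup
  ∧ (∀ e ∈ occ.items, e.2.1 ≤ e.2.2 ∧ e.2.2 < i)
  ∧ (occ.items.map (·.2.1)).Pairwise (· < ·)
  ∧ maxp = (occ.items.map (·.2)).foldl pvG (-1, -1)

lemma pvStep_inv (cwm : List (String × Int)) (i : Int) (c : Char)
    (maxp : Int × Int) (dd : PySem.Dict String (Int × Option Int)) (occ : PySem.Dict String (Int × Int))
    (h : pvInv i maxp dd occ) :
    pvInv (i + 1) (pvStepA cwm (maxp, dd) (i, c)).1 (pvStepA cwm (maxp, dd) (i, c)).2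
      (pvStepB cwm occ (i, c)) := by
  obtain ⟨hrel, hnd, hbd, hpw, hmax⟩ := h
  by_cases hb : (PySem.Dict.mk cwm).getD (String.ofList [c]) 0 > 0
  · have hgets : occ.get? (String.ofList [c]) =
        (dd.get? (String.ofList [c])).map pvConv := by
      rw [pvGet_eq_assoc, pvGet_eq_assoc, hrel, pvAssoc_map]
    cases hdd : dd.get? (String.ofList [c]) with
    | none =>
      have hoccn : occ.get? (String.ofList [c]) = none := by rw [hgets, hdd]; rfl
      have hA : pvStepA cwm (maxp, dd) (i, c) =
          (maxp, dd.insert (String.ofList [c]) (i, none)) := by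
        simp [pvStepA, hb, hdd]
      have hB : pvStepB cwm occ (i, c) = occ.insert (String.ofList [c]) (i, i) := by
        simp [pvStepB, hb, hoccn]
      rw [hA, hB]
      have hcontD : dd.contains (String.ofList [c]) = false := by
        rw [PySem.Dict.contains_eq_isSome_get?, hdd]; rfl
      have hcontO : occ.contains (String.ofList [c]) = false := by
        rw [PySem.Dict.contains_eq_isSome_get?, hoccn]; rfl
      have hitD : (dd.insert (String.ofList [c]) (i, none)).items
          = dd.items ++ [(String.ofList [c], ((i : Int), (none : Option Int)))] := by
        rw [PySem.Dict.items_insert, hcontD]; simp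
      have hitO : (occ.insert (String.ofList [c]) (i, i)).items
          = occ.items ++ [(String.ofList [c], ((i : Int), (i : Int)))] := by
        rw [PySem.Dict.items_insert, hcontO]; simp
      have hnotin : ∀ e ∈ occ.items, e.1 ≠ String.ofList [c] :=
        pvAssoc_none (by rw [← pvGet_eq_assoc]; exact hoccn)
      refine ⟨?_, ?_, ?_, ?_, ?_⟩
      · rw [hitO, hitD, List.map_append, hrel]; rfl
      · rw [hitO, List.map_append, List.nodup_append]
        refine ⟨hnd, by simp, ?_⟩
        intro a ha b hb'
        simp only [List.map_cons, List.map_nil, List.mem_cons, List.not_mem_nil, or_false] at hb'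
        subst hb'
        obtain ⟨e, he, rfl⟩ := List.mem_map.1 ha
        exact hnotin e he
      · intro e he
        rw [hitO] at he
        rcases List.mem_append.1 he with h1 | h1
        · have := hbd e h1; exact ⟨this.1, by omega⟩
        · simp only [List.mem_cons, List.not_mem_nil, or_false] at h1
          subst h1
          exact ⟨show (i : Int) ≤ i from le_refl _, show (i : Int) < i + 1 by omega⟩
      · rw [hitO, List.map_append, List.pairwise_append]
        refine ⟨hpw, by simp, ?_⟩
        intro a ha b hb'
        simp only [List.map_cons, List.map_nil, List.mem_cons, List.not_mem_nil, or_false] at hb'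
        obtain ⟨e, he, rfl⟩ := List.mem_map.1 ha
        have := hbd e he
        omega
      · rw [hitO, List.map_append, List.foldl_append]
        show maxp = List.foldl pvG ((occ.items.map (·.2)).foldl pvG (-1, -1)) [((i : Int), (i : Int))]
        rw [List.foldl_cons, List.foldl_nil, pvG_no]
        · exact hmax
        · have hle := pvD_le_foldl (occ.items.map (·.2)) (-1, -1)
          have h1 : pvD ((i : Int), (i : Int)) = 0 := by simp [pvD]
          have h2 : pvD ((-1 : Int), (-1 : Int)) = 0 := by simp [pvD]
          omega
    | some fv =>
      obtain ⟨f, o⟩ := fv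
      have hocc : occ.get? (String.ofList [c]) = some (f, o.getD f) := by rw [hgets, hdd]; rfl
      have hA : pvStepA cwm (maxp, dd) (i, c) =
          ((if i - f > maxp.2 - maxp.1 then (f, i) else maxp),
            dd.insert (String.ofList [c]) (f, some i)) := by
        simp [pvStepA, hb, hdd]
        split_ifs <;> rfl
      have hB : pvStepB cwm occ (i, c) = occ.insert (String.ofList [c]) (f, i) := by
        simp [pvStepB, hb, hocc]
      rw [hA, hB]
      obtain ⟨p, q, hsplit, hp⟩ :=
        pvAssoc_split (l := occ.items) (k := String.ofList [c]) (v := (f, o.getD f))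
          (by rw [← pvGet_eq_assoc]; exact hocc)
      have hmid : f ≤ o.getD f ∧ o.getD f < i :=
        hbd (String.ofList [c], (f, o.getD f))
          (by rw [hsplit]; exact List.mem_append_right _ (List.mem_cons_self ..))
      have hcontO : occ.contains (String.ofList [c]) = true := by
        rw [PySem.Dict.contains_eq_isSome_get?, hocc]; rfl
      have hcontD : dd.contains (String.ofList [c]) = true := by
        rw [PySem.Dict.contains_eq_isSome_get?, hdd]; rfl
      have hq_ne : ∀ e ∈ q, e.1 ≠ String.ofList [c] := by
        have hnd' := hnd
        rw [hsplit, List.map_append, List.map_cons, List.nodup_append] at hnd'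
        have hk : (String.ofList [c]) ∉ q.map (·.1) := (List.nodup_cons.1 hnd'.2.1).1
        intro e he heq
        exact hk (List.mem_map.2 ⟨e, he, heq⟩)
      have hitO : (occ.insert (String.ofList [c]) (f, i)).items
          = p ++ (String.ofList [c], ((f : Int), (i : Int))) :: q := by
        rw [PySem.Dict.items_insert, hcontO, if_pos rfl]
        rw [hsplit, List.map_append, List.map_cons]
        congr 1
        · refine (List.map_congr_left ?_).trans (List.map_id _)
          intro e he
          simp [hp e he]
        · congr 1
          · simp
          · refine (List.map_congr_left ?_).trans (List.map_id _)
            intro e he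
            simp [hq_ne e he]
      refine ⟨?_, ?_, ?_, ?_, ?_⟩
      · rw [PySem.Dict.items_insert, hcontO, if_pos rfl,
            PySem.Dict.items_insert, hcontD, if_pos rfl]
        rw [hrel, List.map_map, List.map_map]
        refine List.map_congr_left ?_
        intro e he
        by_cases hek : e.1 = String.ofList [c] <;> simp [Function.comp, pvConv, hek]
      · rw [hitO]
        have hnd' := hnd
        rw [hsplit] at hnd'
        simpa using hnd'
      · rw [hitO]
        intro e he
        rcases List.mem_append.1 he with h1 | h1
        · have := hbd e (by rw [hsplit]; exact List.mem_append_left _ h1)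
          exact ⟨this.1, by omega⟩
        · rcases List.mem_cons.1 h1 with rfl | h1
          · exact ⟨show f ≤ i by omega, show (i : Int) < i + 1 by omega⟩
          · have := hbd e (by rw [hsplit]; exact List.mem_append_right _ (List.mem_cons_of_mem _ h1))
            exact ⟨this.1, by omega⟩
      · rw [hitO]
        have hpw' := hpw
        rw [hsplit] at hpw'
        simpa using hpw'
      · rw [hitO, List.map_append, List.map_cons]
        have hq' : ∀ e ∈ q.map (·.2), f < e.1 ∧ e.1 ≤ e.2 ∧ e.2 < i := by
          intro e he
          obtain ⟨x, hx, rfl⟩ := List.mem_map.1 he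
          have hb1 := hbd x (by rw [hsplit]; exact List.mem_append_right _ (List.mem_cons_of_mem _ hx))
          have hpw' := hpw
          rw [hsplit, List.map_append, List.map_cons, List.pairwise_append] at hpw'
          have hcq := hpw'.2.1
          rw [List.pairwise_cons] at hcq
          exact ⟨hcq.1 _ (List.mem_map.2 ⟨x, hx, rfl⟩), hb1.1, hb1.2⟩
        rw [pvF_update (p.map (·.2)) (q.map (·.2)) f (o.getD f) i hq' hmid.1 hmid.2]
        rw [hmax, hsplit, List.map_append, List.map_cons]
        simp only [pvD]
        rfl
  · have hA : pvStepA cwm (maxp, dd) (i, c) = (maxp, dd) := by simp [pvStepA, hb]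
    have hB : pvStepB cwm occ (i, c) = occ := by simp [pvStepB, hb]
    rw [hA, hB]
    exact ⟨hrel, hnd, fun e he => ⟨(hbd e he).1, by have := (hbd e he).2; omega⟩, hpw, hmax⟩

lemma pvLoop_inv (cwm : List (String × Int)) (cs : List Char) :
    ∀ (i : Int) (maxp : Int × Int) (dd : PySem.Dict String (Int × Option Int))
      (occ : PySem.Dict String (Int × Int)), pvInv i maxp dd occ →
    pvInv (i + cs.length)
      ((PySem.List.enumerate cs i).foldl (pvStepA cwm) (maxp, dd)).1
      ((PySem.List.enumerate cs i).foldl (pvStepA cwm) (maxp, dd)).2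
      ((PySem.List.enumerate cs i).foldl (pvStepB cwm) occ) := by
  induction cs with
  | nil => intro i maxp dd occ h; simpa using h
  | cons c t ih =>
    intro i maxp dd occ h
    rw [PySem.List.enumerate_cons, List.foldl_cons, List.foldl_cons]
    have hstep := pvStep_inv cwm i c maxp dd occ h
    have hrec := ih (i + 1)
      (pvStepA cwm (maxp, dd) (i, c)).1 (pvStepA cwm (maxp, dd) (i, c)).2
      (pvStepB cwm occ (i, c)) hstep
    have hidx : (i + 1) + (t.length : Int) = i + ((c :: t).length : Int) := by
      simp only [List.length_cons]
      push_cast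
      ring
    rw [hidx] at hrec
    simpa using hrec

-- ===== B-side lemmas: the ghost dict's items ARE B's filtered first-occurrence list =====

lemma pvKeyBeq (a c : Char) : (String.ofList [a] == String.ofList [c]) = (a == c) := by
  by_cases h : a = c
  · subst h; simp
  · have hne : String.ofList [a] ≠ String.ofList [c] := by
      intro he
      apply h
      have := congrArg String.toList he
      simpa using this
    simp [h, hne]

lemma pvAssocMapKey (v : Int × Char → Int × Int) (L : List (Int × Char)) (c : Char) :
    pvAssoc (L.map (fun p => (String.ofList [p.2], v p))) (String.ofList [c]) =
      (L.find? (fun p => p.2 == c)).map v := by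
  induction L with
  | nil => rfl
  | cons p t ih =>
    rw [List.map_cons, pvAssoc, List.find?_cons]
    have hc : (((String.ofList [p.2], v p) : String × (Int × Int)).1 == String.ofList [c])
        = (p.2 == c) := pvKeyBeq p.2 c
    rw [hc]
    cases hpc : (p.2 == c) with
    | true => simp
    | false => simpa using ih

lemma pvFoldl_if {α : Type} (cond : α → Bool) (f : α → Int × Int) (xs : List α) : ∀ b : Int × Int,
    xs.foldl (fun b x => if cond x then pvG b (f x) else b) b
      = ((xs.filter cond).map f).foldl pvG b := by
  induction xs with
  | nil => intro b; rfl
  | cons x t ih =>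
    intro b
    rw [List.foldl_cons, List.filter_cons]
    cases hx : cond x with
    | true => simp only [if_true, List.map_cons, List.foldl_cons]; exact ih _
    | false => simpa using ih b

lemma pvRIndex_append_self (l : List Char) (c : Char) :
    pvRIndex (l ++ [c]) c = (l.length : Int) := by
  unfold pvRIndex
  rw [List.reverse_append]
  show (((l ++ [c]).length : Int)) - 1 -
      (((PySem.List.index? (c :: l.reverse) c).getD 0 : Nat) : Int) = _
  rw [PySem.List.index?_cons_self]
  simp

lemma pvRIndex_append_of_ne (l : List Char) (c x : Char) (hx : x ∈ l) (hne : x ≠ c) :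
    pvRIndex (l ++ [c]) x = pvRIndex l x := by
  have hxr : x ∈ l.reverse := List.mem_reverse.2 hx
  obtain ⟨k, hk⟩ : ∃ k, PySem.List.index? l.reverse x = some k := by
    have := (PySem.List.index?_isSome_iff l.reverse x).2 hxr
    exact Option.isSome_iff_exists.1 this
  unfold pvRIndex
  rw [List.reverse_append]
  show (((l ++ [c]).length : Int)) - 1 -
      (((PySem.List.index? (c :: l.reverse) x).getD 0 : Nat) : Int) = _
  rw [PySem.List.index?_cons_of_ne _ (Ne.symm hne), hk]
  simp only [Option.map_some, Option.getD_some, List.length_append, List.length_singleton]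
  push_cast
  ring

lemma pvCondB_append_of_mem (cwm : List (String × Int)) (l : List Char) (c : Char)
    (p : Int × Char) (hp : p.2 ∈ l) :
    pvCondB cwm (l ++ [c]) p = pvCondB cwm l p := by
  unfold pvCondB
  rw [PySem.List.index?_append_of_mem _ hp]

lemma pvCondB_new_fresh (cwm : List (String × Int)) (l : List Char) (c : Char) (hc : c ∉ l) :
    pvCondB cwm (l ++ [c]) ((l.length : Int), c)
      = decide ((PySem.Dict.mk cwm).getD (String.ofList [c]) 0 > 0) := by
  unfold pvCondB
  rw [PySem.List.index?_append_singleton_self l c hc]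
  simp

lemma pvCondB_new_repeat (cwm : List (String × Int)) (l : List Char) (c : Char) (hc : c ∈ l) :
    pvCondB cwm (l ++ [c]) ((l.length : Int), c) = false := by
  unfold pvCondB
  rw [PySem.List.index?_append_of_mem _ hc]
  obtain ⟨k, hk⟩ : ∃ k, PySem.List.index? l c = some k :=
    Option.isSome_iff_exists.1 ((PySem.List.index?_isSome_iff l c).2 hc)
  obtain ⟨pre, suf, hl, hlen, -⟩ := (PySem.List.index?_eq_some_iff l c k).1 hk
  have hklt : k < l.length := by rw [hl, ← hlen]; simp
  rw [hk]
  have hne : ((k : Int)) ≠ ((l.length : Int)) := by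
    intro h
    omega
  simp [hne]

-- every element of the enumeration carries a character of the list
lemma pvMemEnum {l : List Char} {p : Int × Char} (hp : p ∈ PySem.List.enumerate l 0) :
    p.2 ∈ l := by
  obtain ⟨k, hk, rfl⟩ := (PySem.List.mem_enumerate_iff l 0 p).1 hp
  exact List.getElem_mem hk

-- unfolding one appended character of the ghost-dict loop
lemma pvOcc_append (cwm : List (String × Int)) (l : List Char) (c : Char) :
    pvOcc cwm (l ++ [c]) = pvStepB cwm (pvOcc cwm l) ((l.length : Int), c) := by
  unfold pvOcc
  rw [PySem.List.enumerate_append, List.foldl_append]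
  rw [show (0 : Int) + (l.length : Int) = (l.length : Int) by ring]
  rw [PySem.List.enumerate_cons, PySem.List.enumerate_nil]
  rfl

-- THE characterization: the ghost dict's items are exactly B's candidates with their partners
lemma pvOcc_items (cwm : List (String × Int)) (cs : List Char) :
    (pvOcc cwm cs).items
      = ((PySem.List.enumerate cs 0).filter (pvCondB cwm cs)).map
          (fun p => (String.ofList [p.2], (p.1, pvRIndex cs p.2))) := by
  induction cs using List.reverseRecOn with
  | nil => rfl
  | append_singleton l c ih =>
    rw [pvOcc_append, PySem.List.enumerate_append,
        show (0 : Int) + (l.length : Int) = (l.length : Int) by ring,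
        PySem.List.enumerate_cons, PySem.List.enumerate_nil, List.filter_append]
    have hfilter : (PySem.List.enumerate l 0).filter (pvCondB cwm (l ++ [c]))
        = (PySem.List.enumerate l 0).filter (pvCondB cwm l) := by
      refine List.filter_congr ?_
      intro p hp
      exact pvCondB_append_of_mem cwm l c p (pvMemEnum hp)
    by_cases hm : (PySem.Dict.mk cwm).getD (String.ofList [c]) 0 > 0
    · -- matched character
      by_cases hcl : c ∈ l
      · -- repeat: overwrite the stored pair's last index
        -- find the first occurrence index k of c in l
        obtain ⟨k, hk⟩ : ∃ k, PySem.List.index? l c = some k :=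
          Option.isSome_iff_exists.1 ((PySem.List.index?_isSome_iff l c).2 hcl)
        obtain ⟨hklt, hgetk, -⟩ := PySem.List.getElem_of_index?_eq_some hk
        have hp0mem : ((k : Int), c) ∈ PySem.List.enumerate l 0 := by
          rw [PySem.List.mem_enumerate_iff]
          exact ⟨k, hklt, by rw [hgetk]; simp⟩
        have hp0cond : pvCondB cwm l ((k : Int), c) = true := by
          unfold pvCondB
          rw [hk]
          simp [hm]
        -- the find? over the filtered list is some q with q.2 = c and q.1 = k
        have hfindSome : ((((PySem.List.enumerate l 0).filter (pvCondB cwm l)).find?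
            (fun p => p.2 == c))).isSome = true := by
          rw [List.find?_isSome]
          exact ⟨((k : Int), c), List.mem_filter.2 ⟨hp0mem, hp0cond⟩, by simp⟩
        obtain ⟨q, hq⟩ := Option.isSome_iff_exists.1 hfindSome
        have hqmem : q ∈ (PySem.List.enumerate l 0).filter (pvCondB cwm l) :=
          List.mem_of_find?_eq_some hq
        have hqc : q.2 = c := by
          have := List.find?_some hq
          simpa using this
        have hq1 : q.1 = (k : Int) := by
          have hqcond := (List.mem_filter.1 hqmem).2
          unfold pvCondB at hqcond
          rw [hqc, hk] at hqcond
          have h2 := (Bool.and_eq_true_iff.1 hqcond).2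
          have h3 : (some ((k : Int)) : Option Int) = some q.1 := eq_of_beq h2
          exact (Option.some.inj h3).symm
        -- the ghost dict's lookup
        have hget : (pvOcc cwm l).get? (String.ofList [c]) = some ((k : Int), pvRIndex l c) := by
          rw [pvGet_eq_assoc, ih, pvAssocMapKey, hq]
          simp [hqc, hq1]
        have hcont : (pvOcc cwm l).contains (String.ofList [c]) = true := by
          rw [PySem.Dict.contains_eq_isSome_get?, hget]; rfl
        have hstep : pvStepB cwm (pvOcc cwm l) ((l.length : Int), c)
            = (pvOcc cwm l).insert (String.ofList [c]) ((k : Int), (l.length : Int)) := by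
          unfold pvStepB
          rw [if_pos hm, hget]
        rw [hstep, PySem.Dict.items_insert_of_contains _ _ hcont, ih]
        rw [List.filter_cons, List.filter_nil, pvCondB_new_repeat cwm l c hcl]
        simp only [Bool.false_eq_true, if_false, List.append_nil]
        rw [hfilter, List.map_map]
        refine List.map_congr_left ?_
        intro p hpf
        have hpmem := (List.mem_filter.1 hpf).1
        have hpcond := (List.mem_filter.1 hpf).2
        by_cases hpc : p.2 = c
        · have hp1 : p.1 = (k : Int) := by
            unfold pvCondB at hpcond
            rw [hpc, hk] at hpcond
            have h2 := (Bool.and_eq_true_iff.1 hpcond).2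
            have h3 : (some ((k : Int)) : Option Int) = some p.1 := eq_of_beq h2
            exact (Option.some.inj h3).symm
          simp only [Function.comp]
          rw [hpc, pvKeyBeq]
          simp only [BEq.rfl, if_pos]
          rw [pvRIndex_append_self, hp1]
        · simp only [Function.comp]
          rw [pvKeyBeq]
          have : (p.2 == c) = false := by simpa using hpc
          rw [this]
          simp only [Bool.false_eq_true, if_false]
          rw [pvRIndex_append_of_ne l c p.2 (pvMemEnum hpmem) hpc]
      · -- fresh matched character: append a new (first, first) pair
        have hgetn : (pvOcc cwm l).get? (String.ofList [c]) = none := by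
          rw [pvGet_eq_assoc, ih, pvAssocMapKey]
          rw [List.find?_eq_none.2]
          · rfl
          · intro p hpf
            have : p.2 ∈ l := pvMemEnum (List.mem_filter.1 hpf).1
            simp only [beq_iff_eq]
            intro h; exact hcl (h ▸ this)
        have hcont : (pvOcc cwm l).contains (String.ofList [c]) = false := by
          rw [PySem.Dict.contains_eq_isSome_get?, hgetn]; rfl
        have hstep : pvStepB cwm (pvOcc cwm l) ((l.length : Int), c)
            = (pvOcc cwm l).insert (String.ofList [c]) ((l.length : Int), (l.length : Int)) := by
          simp [pvStepB, hm, hgetn]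
        rw [hstep, PySem.Dict.items_insert_of_not_contains _ _ hcont, ih]
        rw [List.filter_cons, List.filter_nil, pvCondB_new_fresh cwm l c hcl]
        rw [decide_eq_true hm]
        simp only [if_true]
        rw [hfilter, List.map_append]
        congr 1
        · refine List.map_congr_left ?_
          intro p hpf
          have hpmem := (List.mem_filter.1 hpf).1
          have hpc : p.2 ≠ c := by
            intro h; exact hcl (h ▸ pvMemEnum hpmem)
          rw [pvRIndex_append_of_ne l c p.2 (pvMemEnum hpmem) hpc]
        · simp only [List.map_cons, List.map_nil]
          rw [pvRIndex_append_self]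
    · -- unmatched character: nothing changes
      have hstep : pvStepB cwm (pvOcc cwm l) ((l.length : Int), c) = pvOcc cwm l := by
        simp [pvStepB, hm]
      have hnew : pvCondB cwm (l ++ [c]) ((l.length : Int), c) = false := by
        unfold pvCondB
        simp [hm]
      rw [hstep]
      rw [List.filter_cons, List.filter_nil, hnew]
      simp only [Bool.false_eq_true, if_false, List.append_nil]
      rw [hfilter, ih]
      refine List.map_congr_left ?_
      intro p hpf
      have hpmem := (List.mem_filter.1 hpf).1
      have hpcond := (List.mem_filter.1 hpf).2
      have hpc : p.2 ≠ c := by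
        intro h
        unfold pvCondB at hpcond
        rw [h] at hpcond
        have := (Bool.and_eq_true_iff.1 hpcond).1
        exact hm (of_decide_eq_true this)
      rw [pvRIndex_append_of_ne l c p.2 (pvMemEnum hpmem) hpc]

-- ===== VERDICT (by name: the statement is the Claim_ definition above) =====
theorem get_distances_of_matching_characters_spec : Claim_equal_get_distances_of_matching_characters := by
  intro s cwm _hdom _hpre
  unfold Spec_get_distances_of_matching_characters
  unfold get_distances_of_matching_characters get_distances_of_matching_characters_alt
  have h0 : pvInv 0 (-1, -1) (PySem.Dict.empty : PySem.Dict String (Int × Option Int))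
      (PySem.Dict.empty : PySem.Dict String (Int × Int)) := by
    exact ⟨rfl, by simp [PySem.Dict.empty], by simp [PySem.Dict.empty], by simp [PySem.Dict.empty], rfl⟩
  have h := pvLoop_inv cwm s.toList 0 (-1, -1) PySem.Dict.empty PySem.Dict.empty h0
  obtain ⟨-, -, -, -, hmax⟩ := h
  have hB : (PySem.List.enumerate s.toList 0).foldl (fun best p =>
      if pvCondB cwm s.toList p then
        let last := pvRIndex s.toList p.2
        if last - p.1 > best.2 - best.1 then (p.1, last) else best
      else best) (-1, -1)
      = (((PySem.List.enumerate s.toList 0).filter (pvCondB cwm s.toList)).map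
          (fun p => (p.1, pvRIndex s.toList p.2))).foldl pvG (-1, -1) :=
    pvFoldl_if (pvCondB cwm s.toList) (fun p => (p.1, pvRIndex s.toList p.2))
      (PySem.List.enumerate s.toList 0) (-1, -1)
  have hocc : ((pvOcc cwm s.toList).items.map (·.2))
      = ((PySem.List.enumerate s.toList 0).filter (pvCondB cwm s.toList)).map
          (fun p => (p.1, pvRIndex s.toList p.2)) := by
    rw [pvOcc_items, List.map_map]
    rfl
  dsimp only
  rw [hB, ← hocc]
  have hmax' : ((PySem.List.enumerate s.toList 0).foldl (pvStepA cwm)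
      ((-1, -1), PySem.Dict.empty)).1
      = ((pvOcc cwm s.toList).items.map (·.2)).foldl pvG (-1, -1) := hmax
  rw [← hmax']
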